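-- pv_equiv track=rewrite | github.com/jakobrieder/Rubner | Übungen/Set.py | nonunique
-- ===== SOURCE A (Python) =====
-- def nonunique(daten):
--     count = 0
--     nonuniqueValues = []
--     for n in daten:
--         if daten.count(n) >= 2 and n not in nonuniqueValues:
--             nonuniqueValues.append(n)
--             count = count + 1
--     return count
-- ===== SOURCE B (Python) =====
-- def nonunique(daten):
--     seen = set()
--     dups = set()
--     for n in daten:
--         if n in seen:
--             dups.add(n)
--         else:
--             seen.add(n)
--     return len(dups)
-- ===== Notes on version B (the rewrite author's own statement) =====
-- stated objective: faster
-- what changed: Replaced the quadratic loop that rescans the whole list with .count and a dedup list per element by a single pass maintaining two sets (seen / dups) and returning len(dups).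
import Mathlib
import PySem

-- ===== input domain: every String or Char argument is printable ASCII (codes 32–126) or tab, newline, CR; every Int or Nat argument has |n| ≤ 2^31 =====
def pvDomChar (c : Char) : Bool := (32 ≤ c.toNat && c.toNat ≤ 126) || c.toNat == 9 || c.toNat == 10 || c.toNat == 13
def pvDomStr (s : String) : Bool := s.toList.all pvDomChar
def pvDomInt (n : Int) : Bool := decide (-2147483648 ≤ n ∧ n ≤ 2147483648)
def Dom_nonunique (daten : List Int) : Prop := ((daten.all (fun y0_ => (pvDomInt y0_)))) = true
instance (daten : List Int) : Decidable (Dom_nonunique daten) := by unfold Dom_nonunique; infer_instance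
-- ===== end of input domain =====

-- B replaces A's per-element whole-list .count rescan and dedup list by one pass over two sets (faster).

-- ===== PORT A =====
def pvStepA (daten : List Int) (st : Int × List Int) (n : Int) : Int × List Int :=
  if 2 ≤ PySem.List.count daten n ∧ n ∉ st.2 then (st.1 + 1, st.2 ++ [n]) else st

def nonunique (daten : List Int) : Int :=
  (daten.foldl (pvStepA daten) (0, [])).1

-- ===== PORT B =====
def pvStepB (st : PySem.Set Int × PySem.Set Int) (n : Int) : PySem.Set Int × PySem.Set Int :=
  if PySem.Set.contains st.1 n then (st.1, PySem.Set.add st.2 n) else (PySem.Set.add st.1 n, st.2)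

def nonunique_alt (daten : List Int) : Int :=
  PySem.Set.len ((daten.foldl pvStepB (PySem.Set.empty, PySem.Set.empty)).2)

-- ===== PRECONDITION & SPEC =====
def Spec_nonunique (daten : List Int) (out : Int) : Prop := out = nonunique_alt daten
instance (daten : List Int) (out : Int) : Decidable (Spec_nonunique daten out) := by unfold Spec_nonunique; infer_instance

-- ===== CLAIM (what is proved, stated in full; the proofs are below) =====
def Claim_equal_nonunique : Prop := ∀ (daten : List Int), Dom_nonunique daten → Spec_nonunique daten (nonunique daten)

-- ===== LEMMAS AND PROOFS =====

-- Invariant for A's loop: count = length of the dedup list, the list is Nodup,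
-- and its members are the old ones plus the elements of l occurring ≥ 2 times in daten.
lemma pvA_inv (daten : List Int) :
    ∀ (l : List Int) (c : Int) (vs : List Int), c = (vs.length : Int) → vs.Nodup →
      (l.foldl (pvStepA daten) (c, vs)).1 = (((l.foldl (pvStepA daten) (c, vs)).2).length : Int)
      ∧ ((l.foldl (pvStepA daten) (c, vs)).2).Nodup
      ∧ (∀ x, x ∈ (l.foldl (pvStepA daten) (c, vs)).2 ↔ x ∈ vs ∨ (x ∈ l ∧ 2 ≤ daten.count x)) := by
  intro l
  induction l with
  | nil =>
    intro c vs hc hnd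
    simp [hc, hnd]
  | cons a l ih =>
    intro c vs hc hnd
    simp only [List.foldl_cons, pvStepA]
    split_ifs with h
    · obtain ⟨hcnt, hnm⟩ := h
      have := ih (c + 1) (vs ++ [a]) (by simp [hc])
        (by simp [List.nodup_append, hnd]; intro y hy hya; exact hnm (hya ▸ hy))
      refine ⟨this.1, this.2.1, ?_⟩
      intro x
      rw [this.2.2 x]
      simp only [List.mem_append, List.mem_cons, List.not_mem_nil, or_false]
      rw [PySem.List.count_eq] at hcnt
      constructor
      · rintro ((hv | rfl) | ⟨hx, hc2⟩)
        · exact Or.inl hv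
        · exact Or.inr ⟨Or.inl rfl, hcnt⟩
        · exact Or.inr ⟨Or.inr hx, hc2⟩
      · rintro (hv | ⟨rfl | hx, hc2⟩)
        · exact Or.inl (Or.inl hv)
        · exact Or.inl (Or.inr rfl)
        · exact Or.inr ⟨hx, hc2⟩
    · have := ih c vs hc hnd
      refine ⟨this.1, this.2.1, ?_⟩
      intro x
      rw [this.2.2 x]
      simp only [List.mem_cons]
      rw [PySem.List.count_eq, not_and_or, not_not] at h
      constructor
      · rintro (hv | ⟨hx, hc2⟩)
        · exact Or.inl hv
        · exact Or.inr ⟨Or.inr hx, hc2⟩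
      · rintro (hv | ⟨rfl | hx, hc2⟩)
        · exact Or.inl hv
        · rcases h with h | h
          · omega
          · exact Or.inl h
        · exact Or.inr ⟨hx, hc2⟩

-- Invariant for B's loop: dups stays Nodup, and its members are the old dups,
-- the elements of l already seen, and the elements occurring ≥ 2 times in l.
lemma pvB_inv :
    ∀ (l : List Int) (seen dups : PySem.Set Int), dups.Nodup →
      ((l.foldl pvStepB (seen, dups)).2).Nodup
      ∧ (∀ x, x ∈ (l.foldl pvStepB (seen, dups)).2 ↔
            x ∈ dups ∨ (x ∈ seen ∧ x ∈ l) ∨ 2 ≤ l.count x) := by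
  intro l
  induction l with
  | nil =>
    intro seen dups hnd
    simp [hnd]
  | cons a l ih =>
    intro seen dups hnd
    simp only [List.foldl_cons, pvStepB]
    split_ifs with h
    · rw [PySem.Set.contains_iff] at h
      have := ih seen (PySem.Set.add dups a) (PySem.Set.nodup_add dups a hnd)
      refine ⟨this.1, ?_⟩
      intro x
      rw [this.2 x, PySem.Set.mem_add]
      simp only [List.mem_cons, List.count_cons]
      by_cases hxa : x = a
      · subst hxa
        simp [h]
      · simp [hxa, Ne.symm hxa]
    · rw [PySem.Set.contains_iff] at h
      have := ih (PySem.Set.add seen a) dups hnd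
      refine ⟨this.1, ?_⟩
      intro x
      rw [this.2 x, PySem.Set.mem_add]
      simp only [List.mem_cons, List.count_cons]
      by_cases hxa : x = a
      · subst hxa
        by_cases hd : x ∈ dups
        · simp [hd]
        · by_cases hl : x ∈ l
          · simp [hd, hl, h]
          · have h2 := List.count_eq_zero.mpr hl
            simp [hd, hl, h, h2]
      · simp [hxa, Ne.symm hxa]

-- ===== VERDICT (by name: the statement is the Claim_ definition above) =====
theorem nonunique_spec : Claim_equal_nonunique := by
  intro daten _
  unfold Spec_nonunique nonunique nonunique_alt
  have hA := pvA_inv daten daten 0 [] (by simp) (by simp)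
  have hB := pvB_inv daten PySem.Set.empty PySem.Set.empty (by simp [PySem.Set.empty])
  set FA := (daten.foldl (pvStepA daten) (0, [])).2 with hFA
  set FB := (daten.foldl pvStepB (PySem.Set.empty, PySem.Set.empty)).2 with hFB
  have hmem : ∀ x, x ∈ FA ↔ x ∈ FB := by
    intro x
    rw [hA.2.2 x, hB.2 x]
    simp only [PySem.Set.empty, List.not_mem_nil, false_and, false_or]
    constructor
    · rintro ⟨_, hc⟩; exact hc
    · intro hc
      exact ⟨List.count_pos_iff.mp (by omega), hc⟩
  have hperm : FA.Perm FB := (List.perm_ext_iff_of_nodup hA.2.1 hB.1).mpr hmem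
  rw [hA.1, PySem.Set.len, hperm.length_eq]
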